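-- pv_equiv track=rewrite | github.com/bae1022/Coding-Test | Programmers/코딩테스트 고득점 Kit/모의고사.py | solution
-- ===== SOURCE A (Python) =====
-- def solution(answers):
--     answer = []
--
--     p1 = [1, 2, 3, 4, 5]
--     p2 = [2, 1, 2, 3, 2, 4, 2, 5]
--     p3 = [3, 3, 1, 1, 2, 2, 4, 4, 5, 5]
--
--     cnt = [0, 0, 0]
--
--     for i in range(len(answers)):
--         s1 = i % 5
--         s2 = i % 8
--         s3 = i % 10
--
--         if p1[s1] == answers[i]:
--             cnt[0] += 1
--
--         if p2[s2] == answers[i]: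
--             cnt[1] += 1
--
--         if p3[s3] == answers[i]:
--             cnt[2] += 1
--
--     a = max(cnt)
--
--     for i in range(3):
--         if a == cnt[i]:
--             answer.append(i + 1)
--
--     return answer
-- ===== SOURCE B (Python) =====
-- def solution(answers):
--     patterns = [[1, 2, 3, 4, 5],
--                 [2, 1, 2, 3, 2, 4, 2, 5],
--                 [3, 3, 1, 1, 2, 2, 4, 4, 5, 5]]
--     # Histogram pass: bucket the answers by (index mod 40, value).  40 is the
--     # common period of the three patterns, so the buckets determine all scores.
--     freq = {}
--     for i, a in enumerate(answers):
--         key = (i % 40, a)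
--         freq[key] = freq.get(key, 0) + 1
--     # Score each student from the small bucket table, not from the answers.
--     scores = [sum(c for (r, a), c in freq.items() if p[r % len(p)] == a)
--               for p in patterns]
--     best = max(scores)
--     return [k + 1 for k in range(3) if scores[k] == best]
-- ===== Notes on version B (the rewrite author's own statement) =====
-- stated objective: alternative
-- what changed: A scores by comparing every answer against all three patterns in one indexed loop; B first aggregates the answers into a bounded histogram keyed by (index mod 40, value) -- 40 being the common period of the three patterns -- and then computes each student's score from that bucket table alone, so the scoring stage never touches the answers list.
import Mathlib
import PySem

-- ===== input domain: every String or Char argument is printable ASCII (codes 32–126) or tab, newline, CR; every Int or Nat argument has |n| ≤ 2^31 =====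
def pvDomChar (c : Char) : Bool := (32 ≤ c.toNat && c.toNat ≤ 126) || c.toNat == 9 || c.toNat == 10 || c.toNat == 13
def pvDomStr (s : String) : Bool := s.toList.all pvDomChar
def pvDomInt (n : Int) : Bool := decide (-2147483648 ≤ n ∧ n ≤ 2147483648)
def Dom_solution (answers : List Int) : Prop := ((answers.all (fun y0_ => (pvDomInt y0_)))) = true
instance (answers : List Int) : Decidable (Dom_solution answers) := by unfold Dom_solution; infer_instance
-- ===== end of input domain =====

-- B replaces A's single direct counting loop by a two-stage algorithm: a histogram of the
-- answers keyed by (index mod 40, value) — 40 is the common period of the three patterns —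
-- followed by a scoring stage that reads only the bucket table; objective: alternative, same cost.

-- ===== PORT A =====
-- Transliteration of A: one loop over range(len(answers)) updating cnt = (cnt0, cnt1, cnt2);
-- answers[i] and p[i % m] are ported as getD (index always in range, so exact);
-- max(cnt) is PySem.List.max? (nonempty literal list, so getD 0 never fires).
def solution (answers : List Int) : List Int :=
  let p1 : List Int := [1, 2, 3, 4, 5]
  let p2 : List Int := [2, 1, 2, 3, 2, 4, 2, 5]
  let p3 : List Int := [3, 3, 1, 1, 2, 2, 4, 4, 5, 5]
  let cnt : Int × Int × Int := (List.range answers.length).foldl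
    (fun (c : Int × Int × Int) i =>
      ((if p1.getD (i % 5) 0 = answers.getD i 0 then c.1 + 1 else c.1),
       (if p2.getD (i % 8) 0 = answers.getD i 0 then c.2.1 + 1 else c.2.1),
       (if p3.getD (i % 10) 0 = answers.getD i 0 then c.2.2 + 1 else c.2.2)))
    (0, 0, 0)
  let a : Int := (PySem.List.max? [cnt.1, cnt.2.1, cnt.2.2] (fun x => x)).getD 0
  (List.range 3).foldl
    (fun acc i => if a = [cnt.1, cnt.2.1, cnt.2.2].getD i 0 then acc ++ [(i : Int) + 1] else acc)
    []

-- ===== PORT B =====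
-- Transliteration of B: the histogram loop 'freq[key] = freq.get(key, 0) + 1' over
-- enumerate(answers) is the fold with Dict.insert/getD; the conditional generator
-- 'sum(c for (r, a), c in freq.items() if cond)' is the sum of the items mapped to
-- c-or-0; the final comprehension over range(3) is a filterMap.
def solution_alt (answers : List Int) : List Int :=
  let patterns : List (List Int) :=
    [[1, 2, 3, 4, 5], [2, 1, 2, 3, 2, 4, 2, 5], [3, 3, 1, 1, 2, 2, 4, 4, 5, 5]]
  let freq : PySem.Dict (Int × Int) Int :=
    (PySem.List.enumerate answers 0).foldl
      (fun d ia =>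
        let key : Int × Int := (PySem.Int.mod ia.1 40, ia.2)
        d.insert key (d.getD key 0 + 1))
      PySem.Dict.empty
  let scores : List Int := patterns.map (fun p =>
    (freq.items.map (fun rc =>
      if PySem.List.pyGetD p (PySem.Int.mod rc.1.1 (p.length : Int)) 0 = rc.1.2
      then rc.2 else 0)).sum)
  let best : Int := (PySem.List.max? scores (fun x => x)).getD 0
  (List.range 3).filterMap (fun k =>
    if scores.getD k 0 = best then some ((k : Int) + 1) else none)

-- ===== PRECONDITION & SPEC =====
def Spec_solution (answers : List Int) (out : List Int) : Prop := out = solution_alt answers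
instance (answers : List Int) (out : List Int) : Decidable (Spec_solution answers out) := by unfold Spec_solution; infer_instance

-- ===== CLAIM (what is proved, stated in full; the proofs are below) =====
def Claim_equal_solution : Prop := ∀ (answers : List Int), Dom_solution answers → Spec_solution answers (solution answers)

-- ===== LEMMAS AND PROOFS =====

-- The per-pattern count, recursing on the number of processed indices (matches A's loop shape).
def cnt1 (xs : List Int) (f : Nat → Int) : Nat → Int
  | 0 => 0
  | n + 1 => (if f n = xs.getD n 0 then cnt1 xs f n + 1 else cnt1 xs f n)

-- A's combined triple fold computes the three cnt1's.
lemma triple_fold (xs : List Int) (f1 f2 f3 : Nat → Int) (n : Nat) :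
    (List.range n).foldl
      (fun (c : Int × Int × Int) i =>
        ((if f1 i = xs.getD i 0 then c.1 + 1 else c.1),
         (if f2 i = xs.getD i 0 then c.2.1 + 1 else c.2.1),
         (if f3 i = xs.getD i 0 then c.2.2 + 1 else c.2.2)))
      (0, 0, 0)
    = (cnt1 xs f1 n, cnt1 xs f2 n, cnt1 xs f3 n) := by
  induction n with
  | zero => rfl
  | succ n ih => rw [List.range_succ, List.foldl_append, ih]; simp [cnt1]

-- cnt1 is the match count over the index range.
lemma cnt1_eq_countP (xs : List Int) (f : Nat → Int) (n : Nat) :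
    cnt1 xs f n = ((List.range n).countP (fun i => decide (f i = xs.getD i 0)) : Int) := by
  induction n with
  | zero => rfl
  | succ n ih =>
    rw [List.range_succ, List.countP_append]
    simp only [List.countP_cons, List.countP_nil, cnt1, ih]
    by_cases h : f n = xs.getD n 0
    · rw [if_pos h, decide_eq_true h]
      simp
    · rw [if_neg h, decide_eq_false h]
      simp

-- One distinct key of a nodup list contributes exactly its own filtered unit.
lemma sum_map_ite_unit {α : Type} [BEq α] [LawfulBEq α] [DecidableEq α] (Q : α → Bool) (x : α) :
    ∀ (l : List α), l.Nodup → x ∈ l →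
      (l.map (fun k => if Q k ∧ k = x then (1 : Int) else 0)).sum
        = if Q x then (1 : Int) else 0 := by
  intro l
  induction l with
  | nil => intro _ h; simp at h
  | cons a t ih =>
    intro hnd hm
    simp only [List.map_cons, List.sum_cons]
    by_cases he : x = a
    · subst he
      have hz : (t.map (fun k => if Q k ∧ k = x then (1 : Int) else 0)).sum = 0 := by
        apply List.sum_eq_zero
        intro y hy
        rcases List.mem_map.mp hy with ⟨k, hk, rfl⟩
        have : k ≠ x := fun h => ((List.nodup_cons.mp hnd).1 (h ▸ hk))
        simp [this]
      rw [hz]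
      by_cases h : Q x <;> simp [h]
    · have hmt : x ∈ t := by
        rcases List.mem_cons.mp hm with h | h
        · exact absurd h he
        · exact h
      rw [ih (List.nodup_cons.mp hnd).2 hmt]
      have : a ≠ x := fun h => he h.symm
      simp [this]

-- Summing the filtered multiplicities over any nodup superset of the keys is countP.
lemma sum_counts_eq_countP {α : Type} [BEq α] [LawfulBEq α] [DecidableEq α] (Q : α → Bool) :
    ∀ (ks l : List α), l.Nodup → (∀ x ∈ ks, x ∈ l) →
      (l.map (fun k => if Q k then (ks.count k : Int) else 0)).sum
        = (ks.countP Q : Int) := by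
  intro ks
  induction ks with
  | nil => intro l _ _; simp
  | cons x tl ih =>
    intro l hnd hsub
    have hx : x ∈ l := hsub x List.mem_cons_self
    have hstep : ∀ k : α,
        (if Q k then ((x :: tl).count k : Int) else 0)
          = (if Q k then (tl.count k : Int) else 0)
            + (if Q k ∧ k = x then (1 : Int) else 0) := by
      intro k
      rw [List.count_cons]
      by_cases he : k = x
      · subst he
        by_cases hq : Q k <;> push_cast <;> simp [hq]
      · have he' : ¬ x = k := fun h => he h.symm
        by_cases hq : Q k <;> simp [hq, he, he']
    calc (l.map (fun k => if Q k then ((x :: tl).count k : Int) else 0)).sum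
        = (l.map (fun k => (if Q k then (tl.count k : Int) else 0)
            + (if Q k ∧ k = x then (1 : Int) else 0))).sum := by
          simp only [hstep]
      _ = (l.map (fun k => if Q k then (tl.count k : Int) else 0)).sum
            + (l.map (fun k => if Q k ∧ k = x then (1 : Int) else 0)).sum :=
          PySem.List.sum_map_add_int l _ _
      _ = (tl.countP Q : Int) + (if Q x then (1 : Int) else 0) := by
          rw [ih l hnd (fun y hy => hsub y (List.mem_cons_of_mem _ hy)),
              sum_map_ite_unit Q x l hnd hx]
      _ = ((x :: tl).countP Q : Int) := by
          rw [List.countP_cons]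
          by_cases h : Q x <;> push_cast <;> simp [h]

-- B's score read off the counter dict is the countP over the histogram's key list.
lemma counter_score_eq (Q : (Int × Int) → Bool) (ks : List (Int × Int)) :
    ((PySem.Dict.counter ks).items.map (fun rc => if Q rc.1 then rc.2 else 0)).sum
      = (ks.countP Q : Int) := by
  rw [PySem.Dict.items_counter, List.map_map]
  have h := sum_counts_eq_countP Q ks (PySem.Set.ofList ks) (PySem.Set.nodup_ofList ks)
    (fun x hx => (PySem.Set.mem_ofList ks x).mpr hx)
  simpa [Function.comp_def] using h

-- The histogram's key list, in index form.
lemma keys_eq (answers : List Int) :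
    (PySem.List.enumerate answers 0).map
        (fun ia => ((PySem.Int.mod ia.1 40, ia.2) : Int × Int))
      = (List.range answers.length).map
          (fun i => ((((i % 40 : Nat) : Int), answers.getD i 0) : Int × Int)) := by
  rw [PySem.List.enumerate_eq_map_pyRange answers 0]
  have h : PySem.List.len answers = ((answers.length : Nat) : Int) := by
    simp [PySem.List.len]
  rw [h, PySem.List.pyRange_zero_natCast, List.map_map, List.map_map]
  apply List.map_congr_left
  intro i _
  simp [PySem.List.pyGetD_natCast]

-- The per-key predicate, reduced to A's modular index (m ∣ 40 collapses the double mod).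
lemma key_pred (p : List Int) (hdvd : p.length ∣ 40) (i : Nat) (ans : Int) :
    (decide (PySem.List.pyGetD p (PySem.Int.mod ((i % 40 : Nat) : Int) (p.length : Int)) 0 = ans))
      = decide (p.getD (i % p.length) 0 = ans) := by
  rw [PySem.Int.mod_natCast, PySem.List.pyGetD_natCast, Nat.mod_mod_of_dvd i hdvd]

-- A single pattern's score in B equals A's cnt1 for that pattern.
lemma score_eq (answers p : List Int) (hdvd : p.length ∣ 40) :
    (((PySem.List.enumerate answers 0).foldl
        (fun (d : PySem.Dict (Int × Int) Int) ia =>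
          let key : Int × Int := (PySem.Int.mod ia.1 40, ia.2)
          d.insert key (d.getD key 0 + 1))
        PySem.Dict.empty).items.map (fun rc =>
          if PySem.List.pyGetD p (PySem.Int.mod rc.1.1 (p.length : Int)) 0 = rc.1.2
          then rc.2 else 0)).sum
      = cnt1 answers (fun i => p.getD (i % p.length) 0) answers.length := by
  have hfold : (PySem.List.enumerate answers 0).foldl
      (fun (d : PySem.Dict (Int × Int) Int) ia =>
        let key : Int × Int := (PySem.Int.mod ia.1 40, ia.2)
        d.insert key (d.getD key 0 + 1))
      PySem.Dict.empty
    = PySem.Dict.counter ((PySem.List.enumerate answers 0).map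
        (fun ia => ((PySem.Int.mod ia.1 40, ia.2) : Int × Int))) := by
    rw [← PySem.Dict.foldl_insert_getD_add_one_eq_counter, List.foldl_map]
  rw [hfold, keys_eq]
  have h := counter_score_eq (fun rc =>
      decide (PySem.List.pyGetD p (PySem.Int.mod rc.1 (p.length : Int)) 0 = rc.2))
    ((List.range answers.length).map
      (fun i => ((((i % 40 : Nat) : Int), answers.getD i 0) : Int × Int)))
  simp only [decide_eq_true_eq] at h
  rw [h, List.countP_map, cnt1_eq_countP]
  congr 1
  apply List.countP_congr
  intro i _
  constructor
  · intro hh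
    rw [Function.comp_apply] at hh
    rw [← key_pred p hdvd i (answers.getD i 0)]
    exact hh
  · intro hh
    rw [Function.comp_apply, key_pred p hdvd i (answers.getD i 0)]
    exact hh

-- Final selection stage of A (max, then indexed foldl over range(3)).
def pickA (c1 c2 c3 : Int) : List Int :=
  let a : Int := (PySem.List.max? [c1, c2, c3] (fun x => x)).getD 0
  (List.range 3).foldl
    (fun acc i => if a = [c1, c2, c3].getD i 0 then acc ++ [(i : Int) + 1] else acc) []

-- Final selection stage of B (max, then filterMap over range(3)).
def pickB (c1 c2 c3 : Int) : List Int :=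
  let best : Int := (PySem.List.max? [c1, c2, c3] (fun x => x)).getD 0
  (List.range 3).filterMap (fun k =>
    if [c1, c2, c3].getD k 0 = best then some ((k : Int) + 1) else none)

lemma pick_eq (c1 c2 c3 : Int) : pickA c1 c2 c3 = pickB c1 c2 c3 := by
  unfold pickA pickB
  generalize (PySem.List.max? [c1, c2, c3] (fun x => x)).getD 0 = a
  simp only [show List.range 3 = [0, 1, 2] from rfl, List.foldl_cons, List.foldl_nil,
    List.filterMap_cons, List.filterMap_nil, List.getD_cons_zero, List.getD_cons_succ]
  simp only [eq_comm]
  split_ifs <;> simp_all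

lemma solA (answers : List Int) :
    solution answers =
      pickA ((List.range answers.length).foldl
          (fun (c : Int × Int × Int) i =>
            ((if ([1,2,3,4,5] : List Int).getD (i % 5) 0 = answers.getD i 0 then c.1 + 1 else c.1),
             (if ([2,1,2,3,2,4,2,5] : List Int).getD (i % 8) 0 = answers.getD i 0 then c.2.1 + 1 else c.2.1),
             (if ([3,3,1,1,2,2,4,4,5,5] : List Int).getD (i % 10) 0 = answers.getD i 0 then c.2.2 + 1 else c.2.2)))
          (0, 0, 0)).1
        ((List.range answers.length).foldl
          (fun (c : Int × Int × Int) i =>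
            ((if ([1,2,3,4,5] : List Int).getD (i % 5) 0 = answers.getD i 0 then c.1 + 1 else c.1),
             (if ([2,1,2,3,2,4,2,5] : List Int).getD (i % 8) 0 = answers.getD i 0 then c.2.1 + 1 else c.2.1),
             (if ([3,3,1,1,2,2,4,4,5,5] : List Int).getD (i % 10) 0 = answers.getD i 0 then c.2.2 + 1 else c.2.2)))
          (0, 0, 0)).2.1
        ((List.range answers.length).foldl
          (fun (c : Int × Int × Int) i =>
            ((if ([1,2,3,4,5] : List Int).getD (i % 5) 0 = answers.getD i 0 then c.1 + 1 else c.1),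
             (if ([2,1,2,3,2,4,2,5] : List Int).getD (i % 8) 0 = answers.getD i 0 then c.2.1 + 1 else c.2.1),
             (if ([3,3,1,1,2,2,4,4,5,5] : List Int).getD (i % 10) 0 = answers.getD i 0 then c.2.2 + 1 else c.2.2)))
          (0, 0, 0)).2.2 := rfl

lemma solA' (answers : List Int) :
    solution answers =
      pickA (cnt1 answers (fun i => ([1,2,3,4,5] : List Int).getD (i % 5) 0) answers.length)
        (cnt1 answers (fun i => ([2,1,2,3,2,4,2,5] : List Int).getD (i % 8) 0) answers.length)
        (cnt1 answers (fun i => ([3,3,1,1,2,2,4,4,5,5] : List Int).getD (i % 10) 0) answers.length) := by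
  rw [solA, triple_fold]

lemma solB (answers : List Int) :
    solution_alt answers =
      pickB (((PySem.List.enumerate answers 0).foldl
          (fun (d : PySem.Dict (Int × Int) Int) ia =>
            let key : Int × Int := (PySem.Int.mod ia.1 40, ia.2)
            d.insert key (d.getD key 0 + 1))
          PySem.Dict.empty).items.map (fun rc =>
            if PySem.List.pyGetD [1,2,3,4,5] (PySem.Int.mod rc.1.1 (([1,2,3,4,5] : List Int).length : Int)) 0 = rc.1.2
            then rc.2 else 0)).sum
        (((PySem.List.enumerate answers 0).foldl
          (fun (d : PySem.Dict (Int × Int) Int) ia =>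
            let key : Int × Int := (PySem.Int.mod ia.1 40, ia.2)
            d.insert key (d.getD key 0 + 1))
          PySem.Dict.empty).items.map (fun rc =>
            if PySem.List.pyGetD [2,1,2,3,2,4,2,5] (PySem.Int.mod rc.1.1 (([2,1,2,3,2,4,2,5] : List Int).length : Int)) 0 = rc.1.2
            then rc.2 else 0)).sum
        (((PySem.List.enumerate answers 0).foldl
          (fun (d : PySem.Dict (Int × Int) Int) ia =>
            let key : Int × Int := (PySem.Int.mod ia.1 40, ia.2)
            d.insert key (d.getD key 0 + 1))
          PySem.Dict.empty).items.map (fun rc =>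
            if PySem.List.pyGetD [3,3,1,1,2,2,4,4,5,5] (PySem.Int.mod rc.1.1 (([3,3,1,1,2,2,4,4,5,5] : List Int).length : Int)) 0 = rc.1.2
            then rc.2 else 0)).sum := rfl

lemma solB' (answers : List Int) :
    solution_alt answers =
      pickB (cnt1 answers (fun i => ([1,2,3,4,5] : List Int).getD (i % 5) 0) answers.length)
        (cnt1 answers (fun i => ([2,1,2,3,2,4,2,5] : List Int).getD (i % 8) 0) answers.length)
        (cnt1 answers (fun i => ([3,3,1,1,2,2,4,4,5,5] : List Int).getD (i % 10) 0) answers.length) := by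
  rw [solB, score_eq answers [1,2,3,4,5] (by decide),
      score_eq answers [2,1,2,3,2,4,2,5] (by decide),
      score_eq answers [3,3,1,1,2,2,4,4,5,5] (by decide)]
  rfl

-- ===== VERDICT (by name: the statement is the Claim_ definition above) =====
theorem solution_spec : Claim_equal_solution := by
  intro answers _
  unfold Spec_solution
  rw [solA', solB', pick_eq]
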